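-- pv_equiv track=rewrite | github.com/Ahmed8881/DSA | lab1/final.py | SearchB
-- ===== SOURCE A (Python) =====
-- def SearchB(Arr, x):
--     arr1 = []
--     for i in range(len(Arr)):
--         if Arr[i] == x:
--             arr1 .append(i)
--             if (i != len(Arr) - 1 and Arr[i] != Arr[i + 1]):
--                 break
--     return arr1
-- ===== SOURCE B (Python) =====
-- def SearchB(Arr, x):
--     j = next((i for i, v in enumerate(Arr) if v == x), None)
--     if j is None:
--         return []
--     k = j
--     while k + 1 < len(Arr) and Arr[k] == Arr[k + 1]:
--         k += 1
--     return list(range(j, k + 1))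
-- ===== Notes on version B (the rewrite author's own statement) =====
-- stated objective: simpler
-- what changed: Replaces the single append-and-break loop by a locate-then-extend pair: first find the first index of x, then walk forward while consecutive elements are equal, returning range(j, k+1) instead of accumulating appends.
import Mathlib
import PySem

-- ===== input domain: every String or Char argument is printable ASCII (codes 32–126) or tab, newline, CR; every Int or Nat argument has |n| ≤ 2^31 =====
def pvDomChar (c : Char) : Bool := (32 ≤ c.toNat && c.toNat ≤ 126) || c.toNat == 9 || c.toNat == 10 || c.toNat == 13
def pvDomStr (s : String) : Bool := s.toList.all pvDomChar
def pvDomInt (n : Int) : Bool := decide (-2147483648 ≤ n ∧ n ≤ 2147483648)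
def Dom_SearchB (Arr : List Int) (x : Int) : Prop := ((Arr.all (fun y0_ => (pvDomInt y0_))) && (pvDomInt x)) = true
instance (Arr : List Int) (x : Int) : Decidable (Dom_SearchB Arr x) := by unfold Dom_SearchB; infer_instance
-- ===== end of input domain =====

-- B replaces A's single append-and-break loop by a locate-then-extend pair of passes,
-- returning the index range directly (objective: simpler/alternative decomposition).

-- ===== PORT A =====
-- A's 'for i in range(len(Arr))' with a possible break: structural recursion on the index,
-- accumulator arr1 carried along (indices are always in range, so getD is exact here).
def SearchBGo (Arr : List Int) (x : Int) (i : Nat) (acc : List Int) : List Int :=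
  if i < Arr.length then
    if Arr.getD i 0 == x then
      let acc' := acc ++ [(i : Int)]
      if i ≠ Arr.length - 1 ∧ ¬ (Arr.getD i 0 == Arr.getD (i + 1) 0) then acc'
      else SearchBGo Arr x (i + 1) acc'
    else SearchBGo Arr x (i + 1) acc
  else acc
termination_by Arr.length - i

def SearchB (Arr : List Int) (x : Int) : List Int :=
  SearchBGo Arr x 0 []

-- ===== PORT B =====
-- Source B's while loop extending the run: walk k forward while Arr[k] == Arr[k+1].
def SearchBExtend (Arr : List Int) (k : Nat) : Nat :=
  if k + 1 < Arr.length then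
    if Arr.getD k 0 == Arr.getD (k + 1) 0 then SearchBExtend Arr (k + 1) else k
  else k
termination_by Arr.length - k

-- Source B: first index of x via the enumerate generator (findIdx?), then extend, then range(j, k+1).
def SearchB_alt (Arr : List Int) (x : Int) : List Int :=
  match Arr.findIdx? (fun v => v == x) with
  | none => []
  | some j =>
    let k := SearchBExtend Arr j
    (List.range' j (k + 1 - j)).map (fun n => (n : Int))

-- ===== PRECONDITION & SPEC =====
def Spec_SearchB (Arr : List Int) (x : Int) (out : List Int) : Prop := out = SearchB_alt Arr x
instance (Arr : List Int) (x : Int) (out : List Int) : Decidable (Spec_SearchB Arr x out) := by unfold Spec_SearchB; infer_instance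

-- ===== CLAIM (what is proved, stated in full; the proofs are below) =====
def Claim_equal_SearchB : Prop := ∀ (Arr : List Int) (x : Int), Dom_SearchB Arr x → Spec_SearchB Arr x (SearchB Arr x)

-- ===== LEMMAS AND PROOFS =====

theorem findIdx?_props (l : List Int) (p : Int → Bool) (j : Nat) (h : l.findIdx? p = some j) :
    j < l.length ∧ p (l.getD j 0) = true ∧ ∀ m < j, p (l.getD m 0) = false := by
  rw [List.findIdx?_eq_some_iff_findIdx_eq] at h
  obtain ⟨hl, hj⟩ := h
  refine ⟨hl, ?_, ?_⟩
  · rw [List.getD_eq_getElem _ _ hl]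
    subst hj
    exact List.findIdx_getElem
  · intro m hm
    rw [List.getD_eq_getElem _ _ (hm.trans hl)]
    exact List.not_of_lt_findIdx (hj ▸ hm)

-- A's loop skips non-matching indices without touching the accumulator.
theorem SearchBGo_skip (Arr : List Int) (x : Int) (j : Nat) (hj : j ≤ Arr.length) :
    ∀ d i acc, j - i = d → i ≤ j → (∀ m, i ≤ m → m < j → ¬ Arr.getD m 0 = x) →
      SearchBGo Arr x i acc = SearchBGo Arr x j acc := by
  intro d
  induction d with
  | zero =>
    intro i acc hd hij _
    have h : i = j := by omega
    subst h
    rfl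
  | succ d ih =>
    intro i acc hd hij hno
    have hilt : i < j := by omega
    rw [SearchBGo]
    have hiL : i < Arr.length := by omega
    rw [if_pos hiL]
    have : ¬ (Arr.getD i 0 == x) = true := by
      simpa using hno i le_rfl hilt
    rw [if_neg this]
    exact ih (i + 1) acc (by omega) (by omega) (fun m h1 h2 => hno m (by omega) h2)

theorem SearchBExtend_ge (Arr : List Int) : ∀ k, k ≤ SearchBExtend Arr k := by
  intro k
  rw [SearchBExtend]
  split
  · split
    · have := SearchBExtend_ge Arr (k + 1); omega
    · exact le_rfl
  · exact le_rfl
termination_by k => Arr.length - k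

-- From a matching index, A's loop appends exactly the indices of the run that B's extend pass finds.
theorem SearchBGo_run (Arr : List Int) (x : Int) :
    ∀ d k acc, Arr.length - k = d → k < Arr.length → Arr.getD k 0 = x →
      SearchBGo Arr x k acc =
        acc ++ (List.range' k (SearchBExtend Arr k + 1 - k)).map (fun n => (n : Int)) := by
  intro d
  induction d with
  | zero => intro k acc hd hk _; omega
  | succ d ih =>
    intro k acc hd hk hx
    rw [SearchBGo, if_pos hk, if_pos (by simpa using hx)]
    by_cases hlast : k + 1 < Arr.length
    · by_cases heq : Arr.getD k 0 = Arr.getD (k + 1) 0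
      · -- run continues
        have hbreak : ¬ (k ≠ Arr.length - 1 ∧ ¬ (Arr.getD k 0 == Arr.getD (k + 1) 0) = true) :=
          fun ⟨_, hne⟩ => hne (beq_iff_eq.mpr heq)
        rw [if_neg hbreak]
        have hx1 : Arr.getD (k + 1) 0 = x := by rw [← heq, hx]
        rw [ih (k + 1) (acc ++ [(k : Int)]) (by omega) hlast hx1]
        have hE : SearchBExtend Arr k = SearchBExtend Arr (k + 1) := by
          rw [SearchBExtend, if_pos hlast, if_pos (by simpa using heq)]
        have hge := SearchBExtend_ge Arr (k + 1)
        rw [hE, List.append_assoc]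
        congr 1
        have hcnt : SearchBExtend Arr (k + 1) + 1 - k = (SearchBExtend Arr (k + 1) + 1 - (k + 1)) + 1 := by omega
        rw [hcnt, List.range'_succ]
        simp
      · -- break: next element differs
        have hbreak : k ≠ Arr.length - 1 ∧ ¬ (Arr.getD k 0 == Arr.getD (k + 1) 0) = true := by
          constructor
          · omega
          · simpa using heq
        rw [if_pos hbreak]
        have hE : SearchBExtend Arr k = k := by
          rw [SearchBExtend, if_pos hlast, if_neg (by simpa using heq)]
        rw [hE]
        simp
    · -- k is the last index
      have hbreak : ¬ (k ≠ Arr.length - 1 ∧ ¬ (Arr.getD k 0 == Arr.getD (k + 1) 0) = true) := by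
        have : k = Arr.length - 1 := by omega
        simp [this]
      rw [if_neg hbreak]
      rw [SearchBGo, if_neg (by omega)]
      have hE : SearchBExtend Arr k = k := by
        rw [SearchBExtend, if_neg hlast]
      rw [hE]
      simp

-- ===== VERDICT (by name: the statement is the Claim_ definition above) =====
theorem SearchB_spec : Claim_equal_SearchB := by
  unfold Claim_equal_SearchB
  intro Arr x _
  unfold Spec_SearchB SearchB SearchB_alt
  cases hf : Arr.findIdx? (fun v => v == x) with
  | none =>
    rw [List.findIdx?_eq_none_iff] at hf
    have hno : ∀ m, 0 ≤ m → m < Arr.length → ¬ Arr.getD m 0 = x := by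
      intro m _ hm hx
      have := hf (Arr.getD m 0) (by rw [List.getD_eq_getElem _ _ hm]; exact List.getElem_mem hm)
      simp at this
      exact this hx
    rw [SearchBGo_skip Arr x Arr.length le_rfl (Arr.length - 0) 0 [] rfl (by omega) hno]
    rw [SearchBGo, if_neg (by omega)]
  | some j =>
    obtain ⟨hjl, hjx, hno⟩ := findIdx?_props Arr (fun v => v == x) j hf
    have hjx' : Arr.getD j 0 = x := by simpa using hjx
    rw [SearchBGo_skip Arr x j (le_of_lt hjl) (j - 0) 0 [] rfl (by omega)
      (fun m _ hm hx => by have := hno m hm; simp at this; exact this hx)]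
    rw [SearchBGo_run Arr x (Arr.length - j) j [] rfl hjl hjx']
    simp
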